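-- pv_equiv track=rewrite | github.com/astrekha/python-for-dqe | module_7.py | get_letter_count_upper
-- ===== SOURCE A (Python) =====
-- def get_letter_count_upper(input_str):
--     counts = {}
--     for letter in input_str:
--         if letter.isupper():
--             if letter in counts:
--                 counts[letter] += 1
--             else:
--                 counts[letter] = 1
--         else:
--             if letter.upper() not in counts:
--                 counts[letter.upper()] = 0
--     return counts
-- ===== SOURCE B (Python) =====
-- def get_letter_count_upper(input_str):
--     result = {}
--     for k in dict.fromkeys(input_str.upper()):
--         result[k] = input_str.count(k) if k.isupper() else 0
--     return result
-- ===== Notes on version B (the rewrite author's own statement) =====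
-- stated objective: simpler
-- what changed: Replaces the single interleaved counting/zero-inserting loop over characters by a key-driven formulation: dedup the uppercased string to get the keys in first-occurrence order, then compute each value directly (str.count for uppercase keys, 0 otherwise).
import Mathlib
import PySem

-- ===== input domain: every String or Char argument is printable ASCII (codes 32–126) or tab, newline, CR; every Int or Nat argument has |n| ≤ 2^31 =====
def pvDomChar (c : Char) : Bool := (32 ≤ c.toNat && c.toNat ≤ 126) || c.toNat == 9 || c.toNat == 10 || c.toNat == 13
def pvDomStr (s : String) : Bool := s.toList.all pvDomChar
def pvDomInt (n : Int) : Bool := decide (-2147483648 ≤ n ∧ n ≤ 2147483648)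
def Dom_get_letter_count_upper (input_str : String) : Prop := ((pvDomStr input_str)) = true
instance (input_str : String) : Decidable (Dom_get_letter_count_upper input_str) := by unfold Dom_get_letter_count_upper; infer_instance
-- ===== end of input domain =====

-- B replaces A's single interleaved per-character loop by a key-driven two-step computation
-- (dedup the uppercased string for the keys, then compute each value directly); objective: simpler.

-- ===== PORT A =====
def get_letter_count_upper (input_str : String) : List (String × Int) :=
  (input_str.toList.foldl
    (fun (counts : PySem.Dict String Int) letter =>
      if PySem.Chars.isupper letter then
        if counts.contains (String.singleton letter) then
          counts.modify (String.singleton letter) 0 (· + 1)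
        else
          counts.insert (String.singleton letter) 1
      else
        if !counts.contains (String.singleton (PySem.Chars.upperChar letter)) then
          counts.insert (String.singleton (PySem.Chars.upperChar letter)) 0
        else
          counts)
    PySem.Dict.empty).items

-- ===== PORT B =====
def get_letter_count_upper_alt (input_str : String) : List (String × Int) :=
  ((PySem.List.dedup (PySem.Str.upper input_str).toList).foldl
    (fun (result : PySem.Dict String Int) k =>
      result.insert (String.singleton k)
        (if PySem.Chars.isupper k then ((PySem.Str.count input_str (String.singleton k) : Nat) : Int) else 0))
    PySem.Dict.empty).items

-- ===== PRECONDITION & SPEC =====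
def Spec_get_letter_count_upper (input_str : String) (out : List (String × Int)) : Prop := out = get_letter_count_upper_alt input_str
instance (input_str : String) (out : List (String × Int)) : Decidable (Spec_get_letter_count_upper input_str out) := by unfold Spec_get_letter_count_upper; infer_instance

-- ===== CLAIM (what is proved, stated in full; the proofs are below) =====
def Claim_equal_get_letter_count_upper : Prop := ∀ (input_str : String), Dom_get_letter_count_upper input_str → Spec_get_letter_count_upper input_str (get_letter_count_upper input_str)

-- ===== LEMMAS AND PROOFS =====

-- A's loop body, named for the proofs (definitionally the lambda in the port of A)
def pvStepA (counts : PySem.Dict String Int) (letter : Char) : PySem.Dict String Int :=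
  if PySem.Chars.isupper letter then
    if counts.contains (String.singleton letter) then
      counts.modify (String.singleton letter) 0 (· + 1)
    else
      counts.insert (String.singleton letter) 1
  else
    if !counts.contains (String.singleton (PySem.Chars.upperChar letter)) then
      counts.insert (String.singleton (PySem.Chars.upperChar letter)) 0
    else
      counts

lemma pvSingleton_inj {a b : Char} (h : String.singleton a = String.singleton b) : a = b := by
  have := congrArg String.toList h
  simpa using this

lemma pvUpperChar_of_isupper {c : Char} (h : PySem.Chars.isupper c = true) :
    PySem.Chars.upperChar c = c := by
  simp only [PySem.Chars.isupper, Bool.and_eq_true, decide_eq_true_eq] at h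
  have hca : c < 'a' := lt_of_le_of_lt h.2 (by decide)
  have hni : ¬ ('a' ≤ c) := not_le.mpr hca
  simp [PySem.Chars.upperChar, PySem.Chars.islower, hni]

lemma pvStepA_keys (d : PySem.Dict String Int) (c : Char) :
    (pvStepA d c).keys = PySem.Set.add d.keys (String.singleton (PySem.Chars.upperChar c)) := by
  unfold pvStepA
  by_cases hu : PySem.Chars.isupper c = true
  · rw [pvUpperChar_of_isupper hu, if_pos hu]
    by_cases hc : d.contains (String.singleton c) = true
    · rw [if_pos hc, PySem.Dict.keys_modify, PySem.Dict.keys_insert_of_contains _ _ hc,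
        PySem.Set.add_of_mem ((PySem.Dict.contains_iff_mem_keys _ _).1 hc)]
    · have hc' : d.contains (String.singleton c) = false := Bool.eq_false_iff.mpr hc
      rw [if_neg hc, PySem.Dict.keys_insert_of_not_contains _ _ hc',
        PySem.Set.add_of_not_mem]
      intro hm
      exact hc ((PySem.Dict.contains_iff_mem_keys _ _).2 hm)
  · rw [if_neg hu]
    by_cases hc : d.contains (String.singleton (PySem.Chars.upperChar c)) = true
    · rw [if_neg (by simp [hc])]
      exact (PySem.Set.add_of_mem ((PySem.Dict.contains_iff_mem_keys _ _).1 hc)).symm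
    · have hc' : d.contains (String.singleton (PySem.Chars.upperChar c)) = false :=
        Bool.eq_false_iff.mpr hc
      rw [if_pos (by simp [hc']), PySem.Dict.keys_insert_of_not_contains _ _ hc',
        PySem.Set.add_of_not_mem]
      intro hm
      exact hc ((PySem.Dict.contains_iff_mem_keys _ _).2 hm)

lemma pvStepA_getD (d : PySem.Dict String Int) (c : Char) (k : String) :
    (pvStepA d c).getD k 0
      = d.getD k 0 + (if PySem.Chars.isupper c && (String.singleton c == k) then 1 else 0) := by
  unfold pvStepA
  by_cases hu : PySem.Chars.isupper c = true
  · rw [if_pos hu]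
    by_cases hc : d.contains (String.singleton c) = true
    · rw [if_pos hc, PySem.Dict.getD_modify]
      by_cases hk : k = String.singleton c
      · subst hk; simp [hu]
      · have h1 : (String.singleton c == k) = false :=
          beq_eq_false_iff_ne.mpr (Ne.symm hk)
        rw [if_neg hk]
        simp [h1]
    · have hc' : d.contains (String.singleton c) = false := Bool.eq_false_iff.mpr hc
      rw [if_neg hc, PySem.Dict.getD_insert]
      by_cases hk : k = String.singleton c
      · rw [if_pos hk, hk, PySem.Dict.getD_of_not_contains _ _ hc']
        simp [hu]
      · have h1 : (String.singleton c == k) = false :=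
          beq_eq_false_iff_ne.mpr (Ne.symm hk)
        rw [if_neg hk]
        simp [h1]
  · have hu' : PySem.Chars.isupper c = false := Bool.eq_false_iff.mpr hu
    rw [if_neg hu]
    simp only [hu', Bool.false_and, Bool.false_eq_true, if_false, add_zero]
    by_cases hc : d.contains (String.singleton (PySem.Chars.upperChar c)) = true
    · rw [if_neg (by simp [hc])]
    · have hc' : d.contains (String.singleton (PySem.Chars.upperChar c)) = false :=
        Bool.eq_false_iff.mpr hc
      rw [if_pos (by simp [hc']), PySem.Dict.getD_insert]
      by_cases hk : k = String.singleton (PySem.Chars.upperChar c)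
      · rw [if_pos hk, hk, PySem.Dict.getD_of_not_contains _ _ hc']
      · rw [if_neg hk]

lemma pvKeysA (l : List Char) (d : PySem.Dict String Int) :
    (l.foldl pvStepA d).keys
      = PySem.Set.update d.keys (l.map (fun c => String.singleton (PySem.Chars.upperChar c))) := by
  induction l generalizing d with
  | nil => simp [PySem.Set.update_nil]
  | cons c l ih =>
      rw [List.foldl_cons, ih, pvStepA_keys, List.map_cons, PySem.Set.update_cons]

lemma pvGetDA (l : List Char) (d : PySem.Dict String Int) (k : String) :
    (l.foldl pvStepA d).getD k 0
      = d.getD k 0 + ((l.countP (fun c => PySem.Chars.isupper c && (String.singleton c == k)) : Nat) : Int) := by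
  induction l generalizing d with
  | nil => simp
  | cons c l ih =>
      rw [List.foldl_cons, ih, pvStepA_getD, List.countP_cons]
      by_cases h : (PySem.Chars.isupper c && (String.singleton c == k)) = true
      · simp only [if_pos h]; push_cast; ring
      · simp only [if_neg h]; push_cast; ring

lemma pvMapSingletonOfList (xs : List Char) :
    PySem.Set.ofList (xs.map String.singleton) = (PySem.Set.ofList xs).map String.singleton := by
  induction xs using List.reverseRecOn with
  | nil => simp
  | append_singleton xs x ih =>
      rw [List.map_append, List.map_singleton, PySem.Set.ofList_append_singleton,
        PySem.Set.ofList_append_singleton, ih, PySem.Set.add_eq_ite, PySem.Set.add_eq_ite]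
      by_cases hx : x ∈ PySem.Set.ofList xs
      · rw [if_pos hx, if_pos (List.mem_map_of_mem hx)]
      · rw [if_neg hx, if_neg (fun hm => by
          obtain ⟨a, ha, he⟩ := List.mem_map.1 hm
          exact hx (pvSingleton_inj he ▸ ha)), List.map_append, List.map_singleton]

lemma pvCountGoSingleton (u : Char) (fuel : Nat) (l : List Char) (acc : Nat)
    (h : l.length ≤ fuel) :
    PySem.Chars.count.go [u] fuel l acc = acc + l.count u := by
  induction fuel generalizing l acc with
  | zero =>
      have hl : l = [] := List.eq_nil_of_length_eq_zero (Nat.le_zero.mp h)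
      subst hl
      simp [PySem.Chars.count.go]
  | succ fuel ih =>
      cases l with
      | nil => simp [PySem.Chars.count.go]
      | cons hd t =>
          have hlen : t.length ≤ fuel := by simpa using h
          by_cases he : u = hd
          · subst he
            have hstep : PySem.Chars.count.go [u] (fuel + 1) (u :: t) acc
                = PySem.Chars.count.go [u] fuel t (acc + 1) := by
              simp [PySem.Chars.count.go, List.isPrefixOf]
            rw [hstep, ih t (acc + 1) hlen, List.count_cons]
            simp
            omega
          · have hb : (u == hd) = false := beq_eq_false_iff_ne.mpr he
            have hstep : PySem.Chars.count.go [u] (fuel + 1) (hd :: t) acc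
                = PySem.Chars.count.go [u] fuel t acc := by
              simp [PySem.Chars.count.go, List.isPrefixOf, hb]
            rw [hstep, ih t acc hlen, List.count_cons]
            simp [beq_eq_false_iff_ne.mpr (Ne.symm he)]

lemma pvStrCountSingleton (s : String) (u : Char) :
    PySem.Str.count s (String.singleton u) = s.toList.count u := by
  rw [PySem.Str.count_eq]
  have h1 : (String.singleton u).toList = [u] := by simp
  rw [h1]
  unfold PySem.Chars.count
  rw [if_neg (by simp), pvCountGoSingleton u _ _ _ le_rfl]
  simp

lemma pvCountPValue (l : List Char) (u : Char) :
    ((l.countP (fun c => PySem.Chars.isupper c && (String.singleton c == String.singleton u)) : Nat) : Int)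
      = if PySem.Chars.isupper u then (l.count u : Int) else 0 := by
  have hp : ∀ c ∈ l, (PySem.Chars.isupper c && (String.singleton c == String.singleton u))
      = ((c == u) && PySem.Chars.isupper u) := by
    intro c _
    by_cases h : c = u
    · subst h; simp
    · have h1 : (String.singleton c == String.singleton u) = false :=
        beq_eq_false_iff_ne.mpr (fun hh => h (pvSingleton_inj hh))
      have h2 : (c == u) = false := beq_eq_false_iff_ne.mpr h
      simp [h1, h2]
  rw [List.countP_congr (q := fun c => (c == u) && PySem.Chars.isupper u)
    (fun c hc => by rw [hp c hc])]
  by_cases hu : PySem.Chars.isupper u = true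
  · simp [hu, List.count_eq_countP]
  · have hu' : PySem.Chars.isupper u = false := Bool.eq_false_iff.mpr hu
    simp [hu']

-- ===== VERDICT (by name: the statement is the Claim_ definition above) =====
theorem get_letter_count_upper_spec : Claim_equal_get_letter_count_upper := by
  intro s _
  unfold Spec_get_letter_count_upper
  show (List.foldl pvStepA PySem.Dict.empty s.toList).items = get_letter_count_upper_alt s
  have hnd : (List.foldl pvStepA PySem.Dict.empty s.toList).keys.Nodup := by
    rw [pvKeysA, PySem.Dict.keys_empty, PySem.Set.update_nil_left]
    exact PySem.Set.nodup_ofList _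
  rw [PySem.Dict.items_eq_map_keys _ hnd 0, pvKeysA, PySem.Dict.keys_empty,
    PySem.Set.update_nil_left]
  have hmm : s.toList.map (fun c => String.singleton (PySem.Chars.upperChar c))
      = (s.toList.map PySem.Chars.upperChar).map String.singleton := by
    simp [List.map_map, Function.comp]
  rw [hmm, pvMapSingletonOfList, List.map_map]
  unfold get_letter_count_upper_alt
  have hup : (PySem.Str.upper s).toList = s.toList.map PySem.Chars.upperChar := by
    rw [PySem.Str.toList_upper]; rfl
  rw [hup, PySem.List.dedup_eq_ofList,
    PySem.Dict.items_foldl_insert_fresh _ _ _ _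
      (fun a _ => PySem.Dict.contains_empty _)
      (List.Nodup.map (fun _ _ hh => pvSingleton_inj hh) (PySem.Set.nodup_ofList _))]
  have hemp : (PySem.Dict.empty : PySem.Dict String Int).items = [] := rfl
  rw [hemp, List.nil_append]
  apply List.map_congr_left
  intro u hu
  simp only [Function.comp]
  rw [pvGetDA, PySem.Dict.getD_empty, pvCountPValue, pvStrCountSingleton]
  simp
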